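-- pv_equiv track=rewrite | github.com/Louie-Merriam/MZIONFUBS-map | scripts/merge_april_supplement.py | compute_timeline_meta
-- ===== SOURCE A (Python) =====
-- from typing import Any
--
-- def compute_timeline_meta(people: list[dict[str, Any]]) -> dict[str, int | None]:
--     meta = {
--         "min_year": None,
--         "max_year": None,
--         "people_with_any_timeline": 0,
--         "people_with_start_year": 0,
--         "people_with_lifespan_range": 0,
--         "estimated_birth_year": 0,
--     }
--     for person in people:
--         timeline = person.get("timeline")
--         if not timeline:
--             continue
--         meta["people_with_any_timeline"] += 1
--         if timeline.get("startYear") is not None: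
--             meta["people_with_start_year"] += 1
--         if timeline.get("startYear") is not None and timeline.get("endYear") is not None:
--             meta["people_with_lifespan_range"] += 1
--         if timeline.get("estimatedBirthYear"):
--             meta["estimated_birth_year"] += 1
--         for year in (
--             timeline.get("startYear"),
--             timeline.get("endYear"),
--             timeline.get("birthYear"),
--             timeline.get("deathYear"),
--         ):
--             if year is None:
--                 continue
--             if meta["min_year"] is None or year < meta["min_year"]:
--                 meta["min_year"] = year
--             if meta["max_year"] is None or year > meta["max_year"]:
--                 meta["max_year"] = year
--     return meta
-- ===== SOURCE B (Python) =====
-- def compute_timeline_meta(people):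
--     timelines = [p.get("timeline") for p in people if p.get("timeline")]
--     years = [
--         y
--         for t in timelines
--         for y in (t.get("startYear"), t.get("endYear"), t.get("birthYear"), t.get("deathYear"))
--         if y is not None
--     ]
--     return {
--         "min_year": min(years, default=None),
--         "max_year": max(years, default=None),
--         "people_with_any_timeline": len(timelines),
--         "people_with_start_year": sum(1 for t in timelines if t.get("startYear") is not None),
--         "people_with_lifespan_range": sum(
--             1 for t in timelines if t.get("startYear") is not None and t.get("endYear") is not None
--         ),
--         "estimated_birth_year": sum(1 for t in timelines if t.get("estimatedBirthYear")),
--     }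
-- ===== Notes on version B (the rewrite author's own statement) =====
-- stated objective: simpler
-- what changed: Replaces A's single fused loop with a mutable six-field accumulator by a filtered timelines list, independent generator-sums for each count, and min/max with default=None over a flattened years list.
import Mathlib
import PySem

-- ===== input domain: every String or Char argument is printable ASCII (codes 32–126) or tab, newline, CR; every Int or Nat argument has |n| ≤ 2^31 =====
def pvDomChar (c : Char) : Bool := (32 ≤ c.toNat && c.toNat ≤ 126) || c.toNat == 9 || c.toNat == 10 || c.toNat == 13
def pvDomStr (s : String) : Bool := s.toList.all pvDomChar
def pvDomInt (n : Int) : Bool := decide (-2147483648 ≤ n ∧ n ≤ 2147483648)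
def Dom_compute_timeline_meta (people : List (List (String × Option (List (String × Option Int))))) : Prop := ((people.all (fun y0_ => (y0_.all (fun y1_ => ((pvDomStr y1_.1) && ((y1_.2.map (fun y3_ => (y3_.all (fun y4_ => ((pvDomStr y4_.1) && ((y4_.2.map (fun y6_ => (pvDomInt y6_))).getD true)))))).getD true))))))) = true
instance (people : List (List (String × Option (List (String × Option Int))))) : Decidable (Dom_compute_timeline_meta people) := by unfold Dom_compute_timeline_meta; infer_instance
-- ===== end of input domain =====

-- B replaces A's single fused accumulator loop by a filtered timelines list, independent counts and min/max over a flattened years list (simpler decomposition; return-value equivalence).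


-- shared dictionary-access helpers (Python semantics, used by both ports)
-- person.get("timeline"), collapsing "missing" and "present but None"; then Python truthiness ({} and None are falsy)
def pvGetTimeline (person : List (String × Option (List (String × Option Int)))) : Option (List (String × Option Int)) :=
  match (PySem.Dict.mk person).get? "timeline" with
  | some (some t) => if t.isEmpty then none else some t
  | _ => none

-- timeline.get(k), collapsing "missing" and "present but None" (both are Python None)
def pvTGet (t : List (String × Option Int)) (k : String) : Option Int :=
  match (PySem.Dict.mk t).get? k with
  | some v => v
  | none => none

-- Python truthiness of an int-or-None
def pvTruthyInt (o : Option Int) : Bool :=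
  match o with
  | some y => y != 0
  | none => false

-- the four year fields, in tuple order
def pvYearOpts (t : List (String × Option Int)) : List (Option Int) :=
  [pvTGet t "startYear", pvTGet t "endYear", pvTGet t "birthYear", pvTGet t "deathYear"]

-- ===== PORT A =====
-- A's inner 'for year in (...)' loop body: running min/max update, skipping None
def pvYearStep (s : Option Int × Option Int) (y : Option Int) : Option Int × Option Int :=
  match y with
  | none => s
  | some y =>
    ((match s.1 with | none => some y | some m => if y < m then some y else some m),
     (match s.2 with | none => some y | some m => if m < y then some y else some m))

-- A's loop body for one truthy timeline (counts then the year loop, as in A)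
def pvTStep (s : Option Int × Option Int × Int × Int × Int × Int)
    (t : List (String × Option Int)) : Option Int × Option Int × Int × Int × Int × Int :=
  match s with
  | (mi, ma, c1, c2, c3, c4) =>
    let c1 := c1 + 1
    let c2 := if (pvTGet t "startYear").isSome then c2 + 1 else c2
    let c3 := if (pvTGet t "startYear").isSome && (pvTGet t "endYear").isSome then c3 + 1 else c3
    let c4 := if pvTruthyInt (pvTGet t "estimatedBirthYear") then c4 + 1 else c4
    let mm := (pvYearOpts t).foldl pvYearStep (mi, ma)
    (mm.1, mm.2, c1, c2, c3, c4)

-- A's loop body per person: 'if not timeline: continue'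
def pvStep (s : Option Int × Option Int × Int × Int × Int × Int)
    (person : List (String × Option (List (String × Option Int)))) :
    Option Int × Option Int × Int × Int × Int × Int :=
  match pvGetTimeline person with
  | none => s
  | some t => pvTStep s t

def compute_timeline_meta (people : List (List (String × Option (List (String × Option Int))))) : List (String × Option Int) :=
  let s := people.foldl pvStep (none, none, 0, 0, 0, 0)
  [("min_year", s.1), ("max_year", s.2.1),
   ("people_with_any_timeline", some s.2.2.1),
   ("people_with_start_year", some s.2.2.2.1),
   ("people_with_lifespan_range", some s.2.2.2.2.1),
   ("estimated_birth_year", some s.2.2.2.2.2)]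

-- ===== PORT B =====
def compute_timeline_meta_alt (people : List (List (String × Option (List (String × Option Int))))) : List (String × Option Int) :=
  let timelines := people.filterMap pvGetTimeline
  let years := timelines.flatMap (fun t => (pvYearOpts t).filterMap id)
  [("min_year", PySem.List.min? years (fun y => y)),
   ("max_year", PySem.List.max? years (fun y => y)),
   ("people_with_any_timeline", some (timelines.length : Int)),
   ("people_with_start_year", some ((timelines.countP (fun t => (pvTGet t "startYear").isSome) : Nat) : Int)),
   ("people_with_lifespan_range", some ((timelines.countP (fun t => (pvTGet t "startYear").isSome && (pvTGet t "endYear").isSome) : Nat) : Int)),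
   ("estimated_birth_year", some ((timelines.countP (fun t => pvTruthyInt (pvTGet t "estimatedBirthYear")) : Nat) : Int))]

-- ===== PRECONDITION & SPEC =====
def Spec_compute_timeline_meta (people : List (List (String × Option (List (String × Option Int))))) (out : List (String × Option Int)) : Prop := out = compute_timeline_meta_alt people
instance (people : List (List (String × Option (List (String × Option Int))))) (out : List (String × Option Int)) : Decidable (Spec_compute_timeline_meta people out) := by unfold Spec_compute_timeline_meta; infer_instance

-- ===== CLAIM (what is proved, stated in full; the proofs are below) =====
def Claim_equal_compute_timeline_meta : Prop := ∀ (people : List (List (String × Option (List (String × Option Int))))), Dom_compute_timeline_meta people → Spec_compute_timeline_meta people (compute_timeline_meta people)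

-- ===== LEMMAS AND PROOFS =====

-- running-min / running-max folds over a plain Int list, starting from an optional seed
def pvOMin (o : Option Int) (y : Int) : Option Int :=
  match o with | none => some y | some m => if y < m then some y else some m
def pvOMax (o : Option Int) (y : Int) : Option Int :=
  match o with | none => some y | some m => if m < y then some y else some m

lemma pvYearStep_char (opts : List (Option Int)) (mi ma : Option Int) :
    opts.foldl pvYearStep (mi, ma) =
      ((opts.filterMap id).foldl pvOMin mi, (opts.filterMap id).foldl pvOMax ma) := by
  induction opts generalizing mi ma with
  | nil => rfl
  | cons o rest ih =>
    cases o with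
    | none => simpa [pvYearStep] using ih mi ma
    | some y => simpa [pvYearStep, pvOMin, pvOMax] using ih _ _

lemma pvOMin_some (m y : Int) : pvOMin (some m) y = some (min m y) := by
  simp only [pvOMin, Int.min_def]
  split_ifs <;> simp only [Option.some.injEq] <;> omega
lemma pvOMax_some (m y : Int) : pvOMax (some m) y = some (max m y) := by
  simp only [pvOMax, Int.max_def]
  split_ifs <;> simp only [Option.some.injEq] <;> omega

lemma pvOMin_fold_some (ys : List Int) (m : Int) :
    ys.foldl pvOMin (some m) = some (ys.foldl min m) := by
  induction ys generalizing m with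
  | nil => rfl
  | cons y rest ih => simp [pvOMin_some, ih]
lemma pvOMax_fold_some (ys : List Int) (m : Int) :
    ys.foldl pvOMax (some m) = some (ys.foldl max m) := by
  induction ys generalizing m with
  | nil => rfl
  | cons y rest ih => simp [pvOMax_some, ih]

lemma pvOMin_fold_none (ys : List Int) :
    ys.foldl pvOMin none = PySem.List.min? ys (fun y => y) := by
  cases ys with
  | nil => rfl
  | cons y rest => rw [PySem.List.min?_id_cons]; simpa [pvOMin] using pvOMin_fold_some rest y
lemma pvOMax_fold_none (ys : List Int) :
    ys.foldl pvOMax none = PySem.List.max? ys (fun y => y) := by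
  cases ys with
  | nil => rfl
  | cons y rest => rw [PySem.List.max?_id_cons]; simpa [pvOMax] using pvOMax_fold_some rest y

-- the years of a list of timelines, flattened in A's visit order
def pvYearsOf (ts : List (List (String × Option Int))) : List Int :=
  ts.flatMap (fun t => (pvYearOpts t).filterMap id)

-- characterisation of A's fold over the truthy timelines, from an arbitrary state
lemma pvTStep_fold_char (ts : List (List (String × Option Int)))
    (mi ma : Option Int) (c1 c2 c3 c4 : Int) :
    ts.foldl pvTStep (mi, ma, c1, c2, c3, c4) =
      ((pvYearsOf ts).foldl pvOMin mi, (pvYearsOf ts).foldl pvOMax ma,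
       c1 + (ts.length : Int),
       c2 + ((ts.countP (fun t => (pvTGet t "startYear").isSome) : Nat) : Int),
       c3 + ((ts.countP (fun t => (pvTGet t "startYear").isSome && (pvTGet t "endYear").isSome) : Nat) : Int),
       c4 + ((ts.countP (fun t => pvTruthyInt (pvTGet t "estimatedBirthYear")) : Nat) : Int)) := by
  induction ts generalizing mi ma c1 c2 c3 c4 with
  | nil => simp [pvYearsOf]
  | cons t rest ih =>
    simp only [List.foldl_cons, pvTStep, pvYearStep_char]
    rw [ih]
    simp only [pvYearsOf, List.flatMap_cons, List.foldl_append, List.length_cons,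
      List.countP_cons]
    refine Prod.ext rfl (Prod.ext rfl ?_)
    simp only [Prod.mk.injEq]
    refine ⟨by push_cast; ring, ?_, ?_, ?_⟩ <;>
      · split_ifs <;> push_cast <;> ring

-- A skips exactly the people without a truthy timeline
lemma pvStep_fold_filter (people : List (List (String × Option (List (String × Option Int)))))
    (s : Option Int × Option Int × Int × Int × Int × Int) :
    people.foldl pvStep s = (people.filterMap pvGetTimeline).foldl pvTStep s := by
  induction people generalizing s with
  | nil => rfl
  | cons p rest ih =>
    simp only [List.foldl_cons, pvStep, List.filterMap_cons]
    cases pvGetTimeline p <;> simp [ih]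

-- ===== VERDICT (by name: the statement is the Claim_ definition above) =====
theorem compute_timeline_meta_spec : Claim_equal_compute_timeline_meta := by
  intro people _
  show _ = _
  unfold compute_timeline_meta compute_timeline_meta_alt
  rw [pvStep_fold_filter, pvTStep_fold_char]
  simp [pvOMin_fold_none, pvOMax_fold_none, pvYearsOf]
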